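-- pv_equiv track=rewrite | github.com/MKR2306/pyriku | bcd_and_xcs_converter.py | bcd_converter
-- ===== SOURCE A (Python) =====
-- def bcd_converter(number):
--     bcd = ""
--     for n in number:
--         if n == "0":
--             bcd = bcd + "0000"
--         elif n == "1":
--             bcd = bcd + "0001"
--         elif n == "2":
--             bcd = bcd + "0010"
--         elif n == "3":
--             bcd = bcd + "0011"
--         elif n == "4":
--             bcd = bcd + "0100"
--         elif n == "5":
--             bcd = bcd + "0101"
--         elif n == "6":
--             bcd = bcd + "0110"
--         elif n == "7":
--             bcd = bcd + "0111"
--         elif n == "8":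
--             bcd = bcd + "1000"
--         elif n == "9":
--             bcd = bcd + "1001"
--
--     return bcd
-- ===== SOURCE B (Python) =====
-- def bcd_converter(number):
--     # Encode all digits into ONE big integer (a sentinel 1 bit, then 4 bits
--     # per digit), then render it in binary once and strip the sentinel.
--     acc = 1
--     for ch in number:
--         if "0" <= ch <= "9":
--             acc = acc * 16 + (ord(ch) - 48)
--     return format(acc, "b")[1:]
-- ===== Notes on version B (the rewrite author's own statement) =====
-- stated objective: alternative
-- what changed: Instead of appending a 4-character string per digit via a 10-branch elif table, B packs all digits into a single big integer (a sentinel high bit followed by 4 bits per digit, acc = acc*16 + digit) and renders that integer as a binary string once at the end, stripping the sentinel.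
import Mathlib
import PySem

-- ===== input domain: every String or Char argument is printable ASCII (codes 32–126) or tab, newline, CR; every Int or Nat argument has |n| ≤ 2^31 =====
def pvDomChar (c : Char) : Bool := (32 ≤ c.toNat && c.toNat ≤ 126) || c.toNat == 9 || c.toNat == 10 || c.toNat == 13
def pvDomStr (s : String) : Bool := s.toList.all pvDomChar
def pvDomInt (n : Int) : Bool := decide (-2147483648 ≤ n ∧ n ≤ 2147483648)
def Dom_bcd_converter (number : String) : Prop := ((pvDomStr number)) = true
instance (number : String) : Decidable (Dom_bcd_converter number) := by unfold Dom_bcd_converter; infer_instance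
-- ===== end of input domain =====

-- B encodes the digits into one big integer (sentinel bit + 4 bits per digit) and renders it in
-- binary once, instead of A's per-character elif table with string concatenation (alternative).

-- ===== PORT A =====
-- one iteration of A's elif chain, appending to the accumulator
def bcdStepA (bcd : String) (n : Char) : String :=
  if n = '0' then bcd ++ "0000"
  else if n = '1' then bcd ++ "0001"
  else if n = '2' then bcd ++ "0010"
  else if n = '3' then bcd ++ "0011"
  else if n = '4' then bcd ++ "0100"
  else if n = '5' then bcd ++ "0101"
  else if n = '6' then bcd ++ "0110"
  else if n = '7' then bcd ++ "0111"
  else if n = '8' then bcd ++ "1000"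
  else if n = '9' then bcd ++ "1001"
  else bcd

def bcd_converter (number : String) : String :=
  number.toList.foldl bcdStepA ""

-- ===== PORT B =====
-- format(n, 'b') for n ≥ 1: binary digits of n, most significant first (exact for n ≥ 1)
def binRep : Nat → List Char
  | 0 => []
  | n+1 => binRep ((n+1)/2) ++ [if (n+1) % 2 = 1 then '1' else '0']
decreasing_by exact Nat.div_lt_self (Nat.succ_pos n) (by norm_num)

def bcd_converter_alt (number : String) : String :=
  let acc := number.toList.foldl
    (fun a ch => if '0' ≤ ch ∧ ch ≤ '9' then a * 16 + (ch.toNat - 48) else a) 1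
  -- format(acc, "b")[1:] : acc ≥ 1, so the slice drops the sentinel leading '1'
  String.ofList ((binRep acc).drop 1)

-- ===== PRECONDITION & SPEC =====
def Spec_bcd_converter (number : String) (out : String) : Prop := out = bcd_converter_alt number
instance (number : String) (out : String) : Decidable (Spec_bcd_converter number out) := by unfold Spec_bcd_converter; infer_instance

-- ===== CLAIM (what is proved, stated in full; the proofs are below) =====
def Claim_equal_bcd_converter : Prop := ∀ (number : String), Dom_bcd_converter number → Spec_bcd_converter number (bcd_converter number)

-- ===== LEMMAS AND PROOFS =====
-- common spec: the 4 BCD bits contributed by one character ([] for non-digits)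
def bitsOf (c : Char) : List Char :=
  if '0' ≤ c ∧ c ≤ '9' then
    [ (if (c.toNat - 48) / 8 = 1 then '1' else '0'),
      (if (c.toNat - 48) / 4 % 2 = 1 then '1' else '0'),
      (if (c.toNat - 48) / 2 % 2 = 1 then '1' else '0'),
      (if (c.toNat - 48) % 2 = 1 then '1' else '0') ]
  else []

theorem char_eq_of_toNat {c d : Char} (h : c.toNat = d.toNat) : c = d := Char.ext (UInt32.toNat.inj h)

theorem bcdStepA_eq (bcd : String) (c : Char) :
    bcdStepA bcd c = bcd ++ String.ofList (bitsOf c) := by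
  by_cases h0 : c = '0'
  · subst h0; rw [show String.ofList (bitsOf '0') = "0000" from by decide]; simp [bcdStepA]
  by_cases h1 : c = '1'
  · subst h1; rw [show String.ofList (bitsOf '1') = "0001" from by decide]; simp [bcdStepA]
  by_cases h2 : c = '2'
  · subst h2; rw [show String.ofList (bitsOf '2') = "0010" from by decide]; simp [bcdStepA]
  by_cases h3 : c = '3'
  · subst h3; rw [show String.ofList (bitsOf '3') = "0011" from by decide]; simp [bcdStepA]
  by_cases h4 : c = '4'
  · subst h4; rw [show String.ofList (bitsOf '4') = "0100" from by decide]; simp [bcdStepA]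
  by_cases h5 : c = '5'
  · subst h5; rw [show String.ofList (bitsOf '5') = "0101" from by decide]; simp [bcdStepA]
  by_cases h6 : c = '6'
  · subst h6; rw [show String.ofList (bitsOf '6') = "0110" from by decide]; simp [bcdStepA]
  by_cases h7 : c = '7'
  · subst h7; rw [show String.ofList (bitsOf '7') = "0111" from by decide]; simp [bcdStepA]
  by_cases h8 : c = '8'
  · subst h8; rw [show String.ofList (bitsOf '8') = "1000" from by decide]; simp [bcdStepA]
  by_cases h9 : c = '9'
  · subst h9; rw [show String.ofList (bitsOf '9') = "1001" from by decide]; simp [bcdStepA]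
  have hnd : ¬('0' ≤ c ∧ c ≤ '9') := by
    rintro ⟨hl, hr⟩
    rw [Char.le_def, UInt32.le_iff_toNat_le] at hl hr
    have hl' : 48 ≤ c.toNat := hl
    have hr' : c.toNat ≤ 57 := hr
    interval_cases h : c.toNat <;>
      first
      | exact h0 (char_eq_of_toNat (by rw [h]; decide))
      | exact h1 (char_eq_of_toNat (by rw [h]; decide))
      | exact h2 (char_eq_of_toNat (by rw [h]; decide))
      | exact h3 (char_eq_of_toNat (by rw [h]; decide))
      | exact h4 (char_eq_of_toNat (by rw [h]; decide))
      | exact h5 (char_eq_of_toNat (by rw [h]; decide))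
      | exact h6 (char_eq_of_toNat (by rw [h]; decide))
      | exact h7 (char_eq_of_toNat (by rw [h]; decide))
      | exact h8 (char_eq_of_toNat (by rw [h]; decide))
      | exact h9 (char_eq_of_toNat (by rw [h]; decide))
  simp [bcdStepA, bitsOf, h0, h1, h2, h3, h4, h5, h6, h7, h8, h9, hnd]

theorem stringA_spec (l : List Char) (s : String) :
    l.foldl bcdStepA s = s ++ String.ofList (l.flatMap bitsOf) := by
  induction l generalizing s with
  | nil => simp only [List.foldl_nil, List.flatMap_nil]; rw [show String.ofList ([] : List Char) = "" from rfl]; simp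
  | cons c t ih =>
    simp only [List.foldl_cons, List.flatMap_cons]
    rw [ih, bcdStepA_eq]
    simp [String.append_assoc, String.ofList_append]

theorem binRep_shift (a d : Nat) (ha : 1 ≤ a) (hd : d < 16) :
    binRep (a * 16 + d) = binRep a ++
      [ (if d / 8 = 1 then '1' else '0'),
        (if d / 4 % 2 = 1 then '1' else '0'),
        (if d / 2 % 2 = 1 then '1' else '0'),
        (if d % 2 = 1 then '1' else '0') ] := by
  have step : ∀ (m b : Nat), 1 ≤ m → b < 2 →
      binRep (m * 2 + b) = binRep m ++ [if b = 1 then '1' else '0'] := by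
    intro m b hm hb
    have hpos : 1 ≤ m * 2 + b := by omega
    obtain ⟨k, hk⟩ := Nat.exists_eq_add_of_le hpos
    rw [show m * 2 + b = k + 1 by omega]
    rw [binRep]
    have hdiv : (k + 1) / 2 = m := by omega
    have hmod : (k + 1) % 2 = b := by omega
    rw [hdiv, hmod]
  rw [show a * 16 + d = (a * 8 + d / 2) * 2 + d % 2 from by omega]
  rw [step _ _ (by omega) (by omega)]
  rw [show a * 8 + d / 2 = (a * 4 + d / 4) * 2 + d / 2 % 2 from by omega]
  rw [step _ _ (by omega) (by omega)]
  rw [show a * 4 + d / 4 = (a * 2 + d / 8) * 2 + d / 4 % 2 from by omega]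
  rw [step _ _ (by omega) (by omega)]
  rw [step a (d / 8) ha (by omega)]
  simp

theorem binB_spec (l : List Char) (a : Nat) (ha : 1 ≤ a) :
    binRep (l.foldl (fun a ch => if '0' ≤ ch ∧ ch ≤ '9' then a * 16 + (ch.toNat - 48) else a) a)
      = binRep a ++ l.flatMap bitsOf := by
  induction l generalizing a with
  | nil => simp
  | cons c t ih =>
    simp only [List.foldl_cons, List.flatMap_cons]
    by_cases h : '0' ≤ c ∧ c ≤ '9'
    · have hd : c.toNat - 48 < 16 := by
        have : c.toNat ≤ 57 := h.2
        omega
      rw [if_pos h, ih _ (by omega), binRep_shift a _ ha hd, bitsOf, if_pos h]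
      simp
    · rw [if_neg h, ih _ ha, bitsOf, if_neg h]
      simp

-- ===== VERDICT (by name: the statement is the Claim_ definition above) =====
theorem bcd_converter_spec : Claim_equal_bcd_converter := by
  intro number _
  unfold Spec_bcd_converter bcd_converter bcd_converter_alt
  rw [stringA_spec]
  show _ = String.ofList (List.drop 1 (binRep _))
  rw [binB_spec _ 1 (le_refl 1)]
  simp [binRep]
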